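-- pv_equiv track=rewrite | github.com/hek123/DNN_based_VAD_in_a_WASN | torch_framework/models/encoders.py | _get_all_kernel_sizes
-- ===== SOURCE A (Python) =====
-- def _get_all_kernel_sizes(num_layers: int) -> list[tuple[int]]:
--     assert num_layers > 0
--
--     args = [()]
--     for l in range(num_layers - 1):
--         new_args = []
--         for i in range(len(args)):
--             new_args += [args[i] + (k,) for k in range(1, 10 - sum(args[i]))]
--         args = new_args
--     args = [arg + (9 - sum(arg),) for arg in args]
--     return args
-- ===== SOURCE B (Python) =====
-- def _get_all_kernel_sizes(num_layers: int) -> list[tuple[int]]: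
--     assert num_layers > 0
--
--     def rec(parts: int, remaining: int) -> list[tuple[int]]:
--         if parts == 1:
--             return [(remaining,)]
--         out = []
--         for k in range(1, remaining + 1):
--             out += [(k,) + t for t in rec(parts - 1, remaining - k)]
--         return out
--
--     return rec(num_layers, 9)
-- ===== Notes on version B (the rewrite author's own statement) =====
-- stated objective: alternative
-- what changed: Replaces the iterative breadth-first rebuilding of the whole prefix list (num_layers-1 outer passes, each re-summing every prefix) with a depth-first recursive generator rec(parts, remaining) that threads the remaining budget and emits complete compositions directly.
import Mathlib
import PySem

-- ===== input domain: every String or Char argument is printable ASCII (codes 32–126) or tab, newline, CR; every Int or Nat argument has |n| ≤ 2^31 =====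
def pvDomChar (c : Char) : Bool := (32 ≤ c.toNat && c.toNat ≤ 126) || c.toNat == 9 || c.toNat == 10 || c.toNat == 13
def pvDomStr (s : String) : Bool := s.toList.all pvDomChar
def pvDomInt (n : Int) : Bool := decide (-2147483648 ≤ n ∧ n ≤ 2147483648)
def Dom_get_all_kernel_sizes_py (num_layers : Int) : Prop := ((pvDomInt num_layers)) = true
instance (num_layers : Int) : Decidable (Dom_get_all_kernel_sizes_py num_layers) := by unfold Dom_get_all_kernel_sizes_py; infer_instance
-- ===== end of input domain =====

-- B replaces A's iterative prefix-list rebuilding by a depth-first recursive generator (alternative decomposition, same output).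

-- ===== PORT A =====
def get_all_kernel_sizes_py (num_layers : Int) : List (List Int) :=
  let args : List (List Int) := [[]]
  let args := (PySem.List.pyRange 0 (num_layers - 1) 1).foldl
    (fun args _ =>
      args.foldl (fun new_args a =>
        new_args ++ (PySem.List.pyRange 1 (10 - a.sum) 1).map (fun k => a ++ [k])) [])
    args
  args.map (fun a => a ++ [9 - a.sum])

-- ===== PORT B =====
-- rec(parts, remaining); parts is recursed on as a Nat (Python only calls it with parts ≥ 1; the 0 case is a totality guard)
def recKS : Nat → Int → List (List Int)
  | 0, _ => []
  | 1, remaining => [[remaining]]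
  | (n+2), remaining =>
      (PySem.List.pyRange 1 (remaining + 1) 1).foldl
        (fun out k => out ++ (recKS (n+1) (remaining - k)).map (fun t => k :: t)) []

def get_all_kernel_sizes_py_alt (num_layers : Int) : List (List Int) :=
  recKS num_layers.toNat 9

-- ===== PRECONDITION & SPEC =====
-- Pre_ excludes exactly the non-positive inputs, where A's (and B's) assert raises AssertionError.
def Pre_get_all_kernel_sizes_py (num_layers : Int) : Prop := 0 < num_layers
instance (num_layers : Int) : Decidable (Pre_get_all_kernel_sizes_py num_layers) := by unfold Pre_get_all_kernel_sizes_py; infer_instance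
def pvWitness_get_all_kernel_sizes_py : Int := 3

def Spec_get_all_kernel_sizes_py (num_layers : Int) (out : List (List Int)) : Prop := out = get_all_kernel_sizes_py_alt num_layers
instance (num_layers : Int) (out : List (List Int)) : Decidable (Spec_get_all_kernel_sizes_py num_layers out) := by unfold Spec_get_all_kernel_sizes_py; infer_instance

-- ===== CLAIM (what is proved, stated in full; the proofs are below) =====
def Claim_equal_get_all_kernel_sizes_py : Prop := ∀ (num_layers : Int), Dom_get_all_kernel_sizes_py num_layers → Pre_get_all_kernel_sizes_py num_layers → Spec_get_all_kernel_sizes_py num_layers (get_all_kernel_sizes_py num_layers)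

-- ===== LEMMAS AND PROOFS =====

-- one outer-loop iteration of A
def stepA (args : List (List Int)) : List (List Int) :=
  args.foldl (fun new_args a =>
    new_args ++ (PySem.List.pyRange 1 (10 - a.sum) 1).map (fun k => a ++ [k])) []

def extA (a : List Int) : List (List Int) :=
  (PySem.List.pyRange 1 (10 - a.sum) 1).map (fun k => a ++ [k])

lemma stepA_eq_flatMap (args : List (List Int)) : stepA args = args.flatMap extA := by
  simpa [stepA, extA] using
    PySem.List.foldl_append_eq_flatMap (l := args) (g := extA) (acc := [])

lemma foldl_const_iterate {α β : Type} (g : α → α) (l : List β) (init : α) :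
    l.foldl (fun s _ => g s) init = g^[l.length] init := by
  induction l generalizing init with
  | nil => rfl
  | cons x xs ih => simp [List.foldl_cons, ih, Function.iterate_succ_apply]

lemma recKS_succ (n : Nat) (r : Int) :
    recKS (n+2) r = (PySem.List.pyRange 1 (r + 1) 1).flatMap
      (fun k => (recKS (n+1) (r - k)).map (fun t => k :: t)) := by
  simpa [recKS] using
    PySem.List.foldl_append_eq_flatMap
      (l := PySem.List.pyRange 1 (r + 1) 1)
      (g := fun k => (recKS (n+1) (r - k)).map (fun t => k :: t)) (acc := [])

lemma iter_flatMap (m : Nat) (xs : List (List Int)) :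
    stepA^[m] xs = xs.flatMap (fun a => stepA^[m] [a]) := by
  induction m generalizing xs with
  | zero => simp
  | succ m ih =>
      rw [Function.iterate_succ_apply, stepA_eq_flatMap, ih, List.flatMap_assoc]
      refine List.flatMap_congr (fun a _ => ?_)
      rw [Function.iterate_succ_apply, show stepA [a] = extA a by
        simp [stepA_eq_flatMap, List.flatMap], ih]

lemma key (m : Nat) (a : List Int) :
    (stepA^[m] [a]).map (fun t => t ++ [9 - t.sum])
      = (recKS (m+1) (9 - a.sum)).map (fun t => a ++ t) := by
  induction m generalizing a with
  | zero => simp [recKS]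
  | succ m ih =>
      rw [Function.iterate_succ_apply, show stepA [a] = extA a by
        simp [stepA_eq_flatMap, List.flatMap], iter_flatMap, extA, List.flatMap_map,
        List.map_flatMap]
      rw [show (m+1+1) = m+2 from rfl, recKS_succ,
        show 9 - a.sum + 1 = 10 - a.sum by ring, List.map_flatMap]
      refine List.flatMap_congr (fun k _ => ?_)
      rw [ih]
      simp [List.map_map, Function.comp_def, List.append_assoc, sub_add_eq_sub_sub]

-- ===== VERDICT (by name: the statement is the Claim_ definition above) =====
theorem get_all_kernel_sizes_py_spec : Claim_equal_get_all_kernel_sizes_py := by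
  intro n _ hpre
  show get_all_kernel_sizes_py n = get_all_kernel_sizes_py_alt n
  have h1 : get_all_kernel_sizes_py n
      = (stepA^[(n-1).toNat] [[]]).map (fun t => t ++ [9 - t.sum]) := by
    simp only [get_all_kernel_sizes_py]
    rw [show (fun (args : List (List Int)) (_ : Int) =>
          args.foldl (fun new_args a =>
            new_args ++ (PySem.List.pyRange 1 (10 - a.sum) 1).map (fun k => a ++ [k])) [])
        = (fun args _ => stepA args) from rfl,
      foldl_const_iterate, PySem.List.length_pyRange_one]
    norm_num
  rw [h1, key]
  have hn : (0:Int) < n := hpre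
  have h2 : (n).toNat = (n-1).toNat + 1 := by omega
  rw [get_all_kernel_sizes_py_alt, h2]
  simp
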